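-- pv_equiv track=rewrite | github.com/pypi-data/pypi-mirror-400 | packages/spikee/spikee-0.5.4-py3-none-any.whl/spikee/results.py | preprocess_results
-- ===== SOURCE A (Python) =====
-- def encode_special_characters(value):
--     """Encodes special characters like newlines as '\\n' for Excel export."""
--     if isinstance(value, str):
--         return value.replace("\n", "\\n").replace("\r", "\\r").replace("\t", "\\t")
--     return value  # If not a string, return as-is
--
-- def preprocess_results(results):
--     """Preprocess results to encode special characters in specific fields."""
--     for result in results:
--         # Encode special characters in these fields if they exist
--         if "injection_delimiters" in result:
--             result["injection_delimiters"] = encode_special_characters(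
--                 result["injection_delimiters"]
--             )
--         if "spotlighting_data_markers" in result:
--             result["spotlighting_data_markers"] = encode_special_characters(
--                 result["spotlighting_data_markers"]
--             )
--     return results
-- ===== SOURCE B (Python) =====
-- _FIELDS = frozenset(("injection_delimiters", "spotlighting_data_markers"))
--
--
-- def _escape(text):
--     """Escape control characters in one character-level pass with an accumulator."""
--     out = []
--     for ch in text:
--         if ch == "\n":
--             out.append("\\n")
--         elif ch == "\r":
--             out.append("\\r")
--         elif ch == "\t":
--             out.append("\\t")
--         else:
--             out.append(ch)
--     return "".join(out)
--
--
-- def preprocess_results(results):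
--     """Preprocess results to encode special characters in specific fields.
--
--     Functional rebuild: returns a new list of new dicts (does not mutate its
--     argument), rewriting each record entry-by-entry as it is traversed.
--     """
--     return [
--         {key: _escape(value) if key in _FIELDS and isinstance(value, str) else value
--          for key, value in result.items()}
--         for result in results
--     ]
-- ===== Notes on version B (the rewrite author's own statement) =====
-- stated objective: idiomatic
-- what changed: Instead of probing two hard-coded keys and mutating the dicts in place with three chained .replace passes per string, B rebuilds each record functionally in a single traversal of its entries (a dict comprehension rewriting the two target fields) and escapes each string in one character-level pass with an accumulator; B does not mutate its argument.
import Mathlib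
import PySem

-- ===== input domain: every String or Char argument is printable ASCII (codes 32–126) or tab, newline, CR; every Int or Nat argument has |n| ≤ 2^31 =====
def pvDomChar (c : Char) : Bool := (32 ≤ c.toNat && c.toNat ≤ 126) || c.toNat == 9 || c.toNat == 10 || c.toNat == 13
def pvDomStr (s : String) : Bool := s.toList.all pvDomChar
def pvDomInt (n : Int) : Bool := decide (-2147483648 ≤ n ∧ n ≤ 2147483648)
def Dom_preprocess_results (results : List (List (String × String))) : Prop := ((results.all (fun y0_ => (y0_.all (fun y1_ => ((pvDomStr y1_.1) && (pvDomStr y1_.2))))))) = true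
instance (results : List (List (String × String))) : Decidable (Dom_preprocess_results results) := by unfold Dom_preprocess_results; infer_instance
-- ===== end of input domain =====

-- B rebuilds each record functionally (a dict comprehension over its entries, escaping each string
-- in one character-level pass) instead of A's in-place mutation by key probes with three chained
-- replace passes. A mutates `results` and its dicts in place and returns the same object; B builds
-- and returns a NEW list of new dicts — the theorems are about the returned value only.

-- ===== PORT A =====
def encode_special_characters (value : String) : String :=
  PySem.Str.replace (PySem.Str.replace (PySem.Str.replace value "\n" "\\n") "\r" "\\r") "\t" "\\t"

def preprocess_results (results : List (List (String × String))) : List (List (String × String)) :=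
  results.map (fun result =>
    let d := PySem.Dict.mk result
    let d := if d.contains "injection_delimiters" then
               d.insert "injection_delimiters" (encode_special_characters (d.getD "injection_delimiters" ""))
             else d
    let d := if d.contains "spotlighting_data_markers" then
               d.insert "spotlighting_data_markers" (encode_special_characters (d.getD "spotlighting_data_markers" ""))
             else d
    d.items)

-- ===== PORT B =====
-- one character of the escape loop's body: the string appended to `out` for `ch`
def pvEscOne (ch : Char) : String :=
  if ch = '\n' then "\\n"
  else if ch = '\r' then "\\r"
  else if ch = '\t' then "\\t"
  else String.ofList [ch]

-- _escape: character loop with a list accumulator, then "".join(out)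
def pvEscape (text : String) : String :=
  PySem.Str.join "" (text.toList.foldl (fun out ch => out ++ [pvEscOne ch]) [])

-- the dict comprehension traverses result.items() once; the keys of a dict are distinct (Pre_),
-- so the dict it builds has exactly these rewritten entries, in order — exact on Pre_
def preprocess_results_alt (results : List (List (String × String))) : List (List (String × String)) :=
  results.map (fun result =>
    (PySem.Dict.mk result).items.map (fun kv =>
      if kv.1 == "injection_delimiters" || kv.1 == "spotlighting_data_markers"
      then (kv.1, pvEscape kv.2) else kv))

-- ===== PRECONDITION & SPEC =====
-- Pre_ excludes records whose association lists carry a duplicate key: such a list represents no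
-- Python dict (dict keys are unique), and A's overwrite-all-occurrences differs there from B's
-- entry-by-entry rewrite only as an artefact of the association-list encoding.
def Pre_preprocess_results (results : List (List (String × String))) : Prop :=
  ∀ result ∈ results, (result.map Prod.fst).Nodup
instance (results : List (List (String × String))) : Decidable (Pre_preprocess_results results) := by
  unfold Pre_preprocess_results; infer_instance

def pvWitness_preprocess_results : (List (List (String × String))) :=
  [[("injection_delimiters", "a\nb\t"), ("x", "y\r")], [("other", "z")]]

def Spec_preprocess_results (results : List (List (String × String))) (out : List (List (String × String))) : Prop := out = preprocess_results_alt results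
instance (results : List (List (String × String))) (out : List (List (String × String))) : Decidable (Spec_preprocess_results results out) := by unfold Spec_preprocess_results; infer_instance

-- ===== CLAIM (what is proved, stated in full; the proofs are below) =====
def Claim_equal_preprocess_results : Prop := ∀ (results : List (List (String × String))), Dom_preprocess_results results → Pre_preprocess_results results → Spec_preprocess_results results (preprocess_results results)

-- ===== LEMMAS AND PROOFS =====

-- replace with a single-character pattern is the character-wise flatMap
lemma replace_go_single (o : Char) (new : List Char) :
    ∀ (l : List Char) (fuel : Nat) (acc : List Char), l.length ≤ fuel →
      PySem.Chars.replace.go [o] new fuel l acc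
        = acc.reverse ++ l.flatMap (fun c => if c = o then new else [c]) := by
  intro l
  induction l with
  | nil =>
      intro fuel acc _
      cases fuel <;> simp [PySem.Chars.replace.go]
  | cons c t ih =>
      intro fuel acc h
      cases fuel with
      | zero => simp at h
      | succ f =>
          by_cases hc : c = o
          · subst hc
            have hp : [c].isPrefixOf (c :: t) = true := by simp [List.isPrefixOf]
            rw [PySem.Chars.replace.go, if_pos hp]
            simp only [List.length_cons] at h
            have hd : List.drop [c].length (c :: t) = t := by simp
            rw [hd, ih f (new.reverse ++ acc) (by omega)]
            simp
          · have hp : [o].isPrefixOf (c :: t) = false := by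
              simp [List.isPrefixOf]
              intro h'; exact absurd h'.symm hc
            rw [PySem.Chars.replace.go, if_neg (by simp [hp])]
            simp only [List.length_cons] at h
            rw [ih f (c :: acc) (by omega)]
            simp [hc]

lemma replace_single (s : List Char) (o : Char) (new : List Char) :
    PySem.Chars.replace s [o] new = s.flatMap (fun c => if c = o then new else [c]) := by
  rw [PySem.Chars.replace]
  simp only [List.isEmpty_cons, if_false, Bool.false_eq_true]
  simpa using replace_go_single o new s s.length [] (le_refl _)

-- "".join over a list of pieces is their concatenation
lemma join_nil_flatten (xss : List (List Char)) : PySem.Chars.join [] xss = xss.flatten := by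
  induction xss with
  | nil => rfl
  | cons a t ih =>
    cases t with
    | nil => simp [PySem.Chars.join, List.intercalate]
    | cons b t2 =>
      simp only [PySem.Chars.join, List.intercalate] at *
      simp [List.intersperse] at *
      simp [ih]

-- the three chained replaces equal one character-level pass
lemma encode_eq_escape (s : String) : encode_special_characters s = pvEscape s := by
  have h : (encode_special_characters s).toList = (pvEscape s).toList := by
    simp only [encode_special_characters, pvEscape, PySem.Str.toList_replace, PySem.Str.toList_join]
    have hn : ("\n" : String).toList = ['\n'] := rfl
    have hr : ("\r" : String).toList = ['\r'] := rfl
    have ht : ("\t" : String).toList = ['\t'] := rfl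
    rw [hn, hr, ht, replace_single, replace_single, replace_single]
    rw [PySem.List.foldl_append_singleton_eq_map pvEscOne s.toList []]
    rw [List.nil_append, List.map_map]
    have hsep : ("" : String).toList = ([] : List Char) := rfl
    rw [hsep, join_nil_flatten, ← List.flatMap_def]
    rw [List.flatMap_assoc, List.flatMap_assoc]
    apply List.flatMap_congr
    intro c _
    by_cases h1 : c = '\n'
    · subst h1; decide
    · by_cases h2 : c = '\r'
      · subst h2; decide
      · by_cases h3 : c = '\t'
        · subst h3; decide
        · simp [pvEscOne, Function.comp, h1, h2, h3, String.toList_ofList]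
  exact String.toList_inj.mp h

-- one conditional "escape field k in place" step, on a dict with distinct keys, rewrites the items pointwise
lemma items_cond_insert (d : PySem.Dict String String) (k : String) (g : String → String)
    (hnd : (d.items.map Prod.fst).Nodup) :
    (if d.contains k then d.insert k (g (d.getD k "")) else d).items
      = d.items.map (fun kv => if kv.1 == k then (kv.1, g kv.2) else kv) := by
  have hkeys : d.keys.Nodup := hnd
  by_cases hc : d.contains k = true
  · rw [if_pos hc, PySem.Dict.items_insert_of_contains _ _ hc]
    apply List.map_congr_left
    intro p hp
    by_cases hk : p.1 = k
    · have hmem : (k, p.2) ∈ d.items := by rw [← hk]; exact hp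
      have hg : d.getD k "" = p.2 := PySem.Dict.getD_of_mem_items d hmem hkeys ""
      simp [hk, hg]
    · simp [hk]
  · rw [if_neg hc]
    have hall : ∀ p ∈ d.items, (fun kv : String × String =>
        if kv.1 == k then (kv.1, g kv.2) else kv) p = id p := by
      intro p hp
      have hk : p.1 ≠ k := by
        intro h
        apply hc
        rw [PySem.Dict.contains_iff_mem_keys]
        rw [← h]
        exact List.mem_map_of_mem hp
      simp [hk]
    rw [List.map_congr_left hall, List.map_id]

-- per record: A's two in-place field updates equal B's one entry-by-entry rewrite
lemma record_eq (result : List (String × String)) (hnd : (result.map Prod.fst).Nodup) :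
    (let d := PySem.Dict.mk result
     let d := if d.contains "injection_delimiters" then
                d.insert "injection_delimiters" (encode_special_characters (d.getD "injection_delimiters" ""))
              else d
     let d := if d.contains "spotlighting_data_markers" then
                d.insert "spotlighting_data_markers" (encode_special_characters (d.getD "spotlighting_data_markers" ""))
              else d
     d.items)
    = result.map (fun kv =>
        if kv.1 == "injection_delimiters" || kv.1 == "spotlighting_data_markers"
        then (kv.1, pvEscape kv.2) else kv) := by
  set f1 : String × String → String × String :=
    fun kv => if kv.1 == "injection_delimiters" then (kv.1, encode_special_characters kv.2) else kv with hf1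
  set f2 : String × String → String × String :=
    fun kv => if kv.1 == "spotlighting_data_markers" then (kv.1, encode_special_characters kv.2) else kv with hf2
  have hd0 : (PySem.Dict.mk result).items = result := rfl
  have h1 := items_cond_insert (PySem.Dict.mk result) "injection_delimiters"
      encode_special_characters (by rw [hd0]; exact hnd)
  rw [hd0] at h1
  set d1 := (if (PySem.Dict.mk result).contains "injection_delimiters" then
               (PySem.Dict.mk result).insert "injection_delimiters"
                 (encode_special_characters ((PySem.Dict.mk result).getD "injection_delimiters" ""))
             else PySem.Dict.mk result) with hd1
  have hkeys1 : d1.items.map Prod.fst = result.map Prod.fst := by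
    rw [h1, List.map_map]
    apply List.map_congr_left
    intro kv _
    by_cases hk : kv.1 = "injection_delimiters" <;> simp [hk]
  have h2 := items_cond_insert d1 "spotlighting_data_markers"
      encode_special_characters (by rw [hkeys1]; exact hnd)
  show (if d1.contains "spotlighting_data_markers" then
          d1.insert "spotlighting_data_markers"
            (encode_special_characters (d1.getD "spotlighting_data_markers" ""))
        else d1).items = _
  rw [h2, h1, List.map_map]
  apply List.map_congr_left
  intro kv _
  by_cases hk1 : kv.1 = "injection_delimiters"
  · simp [hk1, encode_eq_escape]
  · by_cases hk2 : kv.1 = "spotlighting_data_markers" <;>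
      simp [hk1, hk2, encode_eq_escape]

-- ===== VERDICT (by name: the statement is the Claim_ definition above) =====
theorem preprocess_results_spec : Claim_equal_preprocess_results := by
  intro results _ hpre
  unfold Spec_preprocess_results preprocess_results preprocess_results_alt
  apply List.map_congr_left
  intro result hr
  exact record_eq result (hpre result hr)
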